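-- pv_equiv track=rewrite | github.com/fsayahmob/isciacus-monitoring | backend/jobs/workflows/gmc_audit.py | _extract_product_issues
-- ===== SOURCE A (Python) =====
-- from typing import Any
--
-- def _extract_product_issues(
--     product: dict[str, Any],
--     product_id: str,
--     title: str,
-- ) -> tuple[list[dict], dict[str, list[dict]]]:
--     """Extract rejection reasons from product issues."""
--     item_issues = product.get("itemLevelIssues", [])
--     product_issues = []
--     rejection_reasons: dict[str, list[dict]] = {}
--     seen_codes = set()
--
--     for issue in item_issues:
--         if issue.get("servability") == "disapproved":
--             code = issue.get("code", "unknown")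
--             if code not in seen_codes:
--                 seen_codes.add(code)
--                 issue_info = {
--                     "product_id": product_id,
--                     "title": title,
--                     "description": issue.get("description", code),
--                     "attribute": issue.get("attributeName", ""),
--                     "detail": issue.get("detail", ""),
--                     "documentation": issue.get("documentation", ""),
--                 }
--                 if code not in rejection_reasons:
--                     rejection_reasons[code] = []
--                 rejection_reasons[code].append(issue_info)
--                 product_issues.append(issue_info)
--
--     return product_issues, rejection_reasons
-- ===== SOURCE B (Python) =====
-- def _extract_product_issues(product, product_id, title):
--     """Extract rejection reasons from product issues.
--
--     B: staged passes instead of A's single stateful loop — first a comprehension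
--     collects (code, issue) for the disapproved issues, then a recursive
--     filter-based dedup keeps the first pair per code (no seen-set), and finally
--     comprehensions shape both return values from the deduped pairs.
--     """
--     pairs = [(issue.get("code", "unknown"), issue)
--              for issue in product.get("itemLevelIssues", [])
--              if issue.get("servability") == "disapproved"]
--
--     def first_per_code(ps):
--         if not ps:
--             return []
--         code, issue = ps[0]
--         return [(code, issue)] + first_per_code([p for p in ps[1:] if p[0] != code])
--
--     infos = [(code, {
--         "product_id": product_id,
--         "title": title,
--         "description": issue.get("description", code),
--         "attribute": issue.get("attributeName", ""),
--         "detail": issue.get("detail", ""),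
--         "documentation": issue.get("documentation", ""),
--     }) for code, issue in first_per_code(pairs)]
--
--     return [info for _, info in infos], {code: [info] for code, info in infos}
-- ===== Notes on version B (the rewrite author's own statement) =====
-- stated objective: alternative
-- what changed: A does one stateful loop with a seen_codes set and parallel appends to product_issues and rejection_reasons; B is staged: a comprehension extracts (code, issue) pairs for disapproved issues, a recursive filter-based dedup (nub) keeps the first pair per code, and both outputs are shaped afterwards by comprehensions over that deduped list.
import Mathlib
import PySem

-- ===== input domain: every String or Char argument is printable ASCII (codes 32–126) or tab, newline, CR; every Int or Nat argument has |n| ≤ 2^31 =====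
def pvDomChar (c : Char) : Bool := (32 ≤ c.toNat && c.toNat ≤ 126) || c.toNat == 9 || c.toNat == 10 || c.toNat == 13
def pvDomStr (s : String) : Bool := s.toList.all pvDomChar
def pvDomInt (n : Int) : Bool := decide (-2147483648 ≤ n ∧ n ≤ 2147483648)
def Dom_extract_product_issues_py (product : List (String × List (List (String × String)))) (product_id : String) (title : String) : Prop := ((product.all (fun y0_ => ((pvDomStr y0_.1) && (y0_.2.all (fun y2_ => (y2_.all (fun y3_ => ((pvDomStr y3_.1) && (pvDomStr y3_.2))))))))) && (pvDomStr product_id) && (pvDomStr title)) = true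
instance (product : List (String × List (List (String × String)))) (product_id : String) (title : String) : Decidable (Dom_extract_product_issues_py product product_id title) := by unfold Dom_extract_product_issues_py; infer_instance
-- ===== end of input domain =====

-- B replaces A's single stateful loop (seen_codes set + parallel appends) by staged passes:
-- extract (code, issue) pairs, recursive filter-based first-per-code dedup, then shape both
-- outputs from the deduped pairs (objective: alternative; no speed claim).

-- ===== PORT A =====
-- loop body of A: state = (product_issues, rejection_reasons, seen_codes)
def pvStepA (product_id : String) (title : String)
    (st : List (List (String × String)) × PySem.Dict String (List (List (String × String))) × PySem.Set String)
    (issue : List (String × String)) :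
    List (List (String × String)) × PySem.Dict String (List (List (String × String))) × PySem.Set String :=
  let d := PySem.Dict.mk issue
  if d.get? "servability" = some "disapproved" then
    let code := d.getD "code" "unknown"
    if PySem.Set.contains st.2.2 code then st
    else
      let seen := PySem.Set.add st.2.2 code
      let info := [("product_id", product_id), ("title", title),
                   ("description", d.getD "description" code),
                   ("attribute", d.getD "attributeName" ""),
                   ("detail", d.getD "detail" ""),
                   ("documentation", d.getD "documentation" "")]
      let rr := if st.2.1.contains code then st.2.1 else st.2.1.insert code []
      -- rejection_reasons[code].append(issue_info): code is a key of rr here, so modify with default [] is exact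
      let rr := rr.modify code [] (fun g => g ++ [info])
      (st.1 ++ [info], rr, seen)
  else st

def extract_product_issues_py (product : List (String × List (List (String × String)))) (product_id : String) (title : String) : (List (List (String × String))) × (List (String × List (List (String × String)))) :=
  let item_issues := (PySem.Dict.mk product).getD "itemLevelIssues" []
  let st := item_issues.foldl (pvStepA product_id title)
    ([], PySem.Dict.mk [], PySem.Set.empty)
  (st.1, st.2.1.items)

-- ===== PORT B =====
-- first comprehension of B: (code, issue) for the disapproved issues
def pvPairs (issues : List (List (String × String))) : List (String × List (String × String)) :=
  issues.filterMap (fun issue =>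
    let d := PySem.Dict.mk issue
    if d.get? "servability" = some "disapproved" then some (d.getD "code" "unknown", issue) else none)

-- B's recursive first_per_code: keep the head, drop later pairs with the same code, recurse
def pvFirstPerCode : List (String × List (String × String)) → List (String × List (String × String))
  | [] => []
  | p :: rest => p :: pvFirstPerCode (rest.filter (fun q => !(q.1 == p.1)))
termination_by ps => ps.length
decreasing_by
  simp only [List.length_unattach, List.length_cons]
  exact Nat.lt_succ_of_le (le_trans (List.length_filter_le _ _) (by simp))

-- issue_info built by B for a deduped (code, issue) pair
def pvBuild (product_id : String) (title : String) (p : String × List (String × String)) : List (String × String) :=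
  let d := PySem.Dict.mk p.2
  [("product_id", product_id), ("title", title),
   ("description", d.getD "description" p.1),
   ("attribute", d.getD "attributeName" ""),
   ("detail", d.getD "detail" ""),
   ("documentation", d.getD "documentation" "")]

def extract_product_issues_py_alt (product : List (String × List (List (String × String)))) (product_id : String) (title : String) : (List (List (String × String))) × (List (String × List (List (String × String)))) :=
  let pairs := pvPairs ((PySem.Dict.mk product).getD "itemLevelIssues" [])
  let infos := (pvFirstPerCode pairs).map (fun p => (p.1, pvBuild product_id title p))
  -- codes are pairwise distinct after first_per_code, so the dict comprehension's items are exactly this list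
  (infos.map Prod.snd, (PySem.Dict.mk (infos.map (fun q => (q.1, [q.2])))).items)

-- ===== PRECONDITION & SPEC =====
def Spec_extract_product_issues_py (product : List (String × List (List (String × String)))) (product_id : String) (title : String) (out : (List (List (String × String))) × (List (String × List (List (String × String))))) : Prop := out = extract_product_issues_py_alt product product_id title
instance (product : List (String × List (List (String × String)))) (product_id : String) (title : String) (out : (List (List (String × String))) × (List (String × List (List (String × String))))) : Decidable (Spec_extract_product_issues_py product product_id title out) := by unfold Spec_extract_product_issues_py; infer_instance

-- ===== CLAIM (what is proved, stated in full; the proofs are below) =====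
def Claim_equal_extract_product_issues_py : Prop := ∀ (product : List (String × List (List (String × String)))) (product_id : String) (title : String), Dom_extract_product_issues_py product product_id title → Spec_extract_product_issues_py product product_id title (extract_product_issues_py product product_id title)

-- ===== LEMMAS AND PROOFS =====

-- A's loop state reached after having kept the deduped pairs L (in order)
def pvRepr (product_id title : String) (L : List (String × List (String × String))) :
    List (List (String × String)) × PySem.Dict String (List (List (String × String))) × PySem.Set String :=
  (L.map (pvBuild product_id title),
   PySem.Dict.mk (L.map (fun p => (p.1, [pvBuild product_id title p]))),
   L.map Prod.fst)

-- A's "rejection_reasons[code] = []; rejection_reasons[code].append(info)" on a fresh key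
-- just appends the entry (code, [info])
lemma pvInsertModify {α : Type} (d : PySem.Dict String (List α)) (k : String) (x : α)
    (hd : d.contains k = false) :
    ((d.insert k []).modify k [] (fun g => g ++ [x])).items = d.items ++ [(k, [x])] := by
  have hnm : ∀ p ∈ d.items, ¬ (p.1 == k) = true := by
    simpa only [PySem.Dict.contains, List.any_eq_false] using hd
  simp only [PySem.Dict.modify, PySem.Dict.insert, hd, Bool.false_eq_true, if_false]
  have hc2 : (PySem.Dict.mk (d.items ++ [(k, ([] : List α))])).contains k = true := by
    simp [PySem.Dict.contains]
  rw [if_pos hc2]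
  have hget : (PySem.Dict.mk (d.items ++ [(k, ([] : List α))])).getD k [] = [] := by
    simp only [PySem.Dict.getD, PySem.Dict.get?]
    rw [List.find?_append]
    have hfn : d.items.find? (fun p => p.1 == k) = none := List.find?_eq_none.mpr hnm
    simp [hfn]
  rw [hget]
  simp only [List.map_append]
  congr 1
  · conv_rhs => rw [← List.map_id d.items]
    exact List.map_congr_left (fun p hp => by simp [hnm p hp])
  · simp

-- unfolding equations of pvFirstPerCode (well-founded definition, so not definitional)
lemma pvFirstPerCode_nil : pvFirstPerCode [] = [] := by
  conv_lhs => unfold pvFirstPerCode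

lemma pvFirstPerCode_cons (p : String × List (String × String)) (rest : List (String × List (String × String))) :
    pvFirstPerCode (p :: rest) = p :: pvFirstPerCode (rest.filter (fun q => !(q.1 == p.1))) := by
  conv_lhs => unfold pvFirstPerCode

-- main invariant: folding A's step from pvRepr L lands in pvRepr of L extended by the
-- first-per-code dedup of the remaining disapproved pairs with codes not yet in L
lemma pvFoldA (product_id title : String) (issues : List (List (String × String)))
    (L : List (String × List (String × String))) :
    issues.foldl (pvStepA product_id title) (pvRepr product_id title L)
      = pvRepr product_id title
          (L ++ pvFirstPerCode ((pvPairs issues).filter (fun p => !(L.map Prod.fst).contains p.1))) := by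
  induction issues generalizing L with
  | nil => simp [pvPairs, pvFirstPerCode_nil]
  | cons x xs ih =>
    simp only [List.foldl_cons]
    by_cases hs : (PySem.Dict.mk x).get? "servability" = some "disapproved"
    · set c := (PySem.Dict.mk x).getD "code" "unknown" with hc
      have hpairs : pvPairs (x :: xs) = (c, x) :: pvPairs xs := by
        simp [pvPairs, hs, ← hc]
      by_cases hmem : c ∈ L.map Prod.fst
      · -- already seen: A skips, the filtered pair list drops the head
        have hset : PySem.Set.contains (pvRepr product_id title L).2.2 c = true := by
          simpa [pvRepr, PySem.Set.contains] using hmem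
        have hstep : pvStepA product_id title (pvRepr product_id title L) x
            = pvRepr product_id title L := by
          simp only [pvStepA, hs, if_true, ← hc, hset]
        rw [hstep, ih L, hpairs]
        simp [hmem]
      · -- fresh code: A appends everywhere ⇒ state is pvRepr (L ++ [(c, x)])
        have hset : PySem.Set.contains (pvRepr product_id title L).2.2 c = false := by
          simpa [pvRepr, PySem.Set.contains] using hmem
        have hrr : (pvRepr product_id title L).2.1.contains c = false := by
          simp only [pvRepr, PySem.Dict.contains, List.any_eq_false]
          intro p hp
          obtain ⟨q, hq, rfl⟩ := List.mem_map.mp hp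
          exact fun e => hmem (List.mem_map.mpr ⟨q, hq, eq_of_beq e⟩)
        have hitems := pvInsertModify (pvRepr product_id title L).2.1 c
          (pvBuild product_id title (c, x)) hrr
        have hadd : PySem.Set.add (pvRepr product_id title L).2.2 c
            = (pvRepr product_id title L).2.2 ++ [c] :=
          PySem.Set.add_of_not_mem (by simpa [pvRepr] using hmem)
        have hstep : pvStepA product_id title (pvRepr product_id title L) x
            = pvRepr product_id title (L ++ [(c, x)]) := by
          simp only [pvStepA, hs, if_true, ← hc, hset, Bool.false_eq_true, if_false, hrr]
          refine Prod.ext ?_ (Prod.ext (PySem.Dict.ext ?_) ?_)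
          · simp [pvRepr, pvBuild]
          · rw [show (pvBuild product_id title (c, x)) =
                  [("product_id", product_id), ("title", title),
                   ("description", (PySem.Dict.mk x).getD "description" c),
                   ("attribute", (PySem.Dict.mk x).getD "attributeName" ""),
                   ("detail", (PySem.Dict.mk x).getD "detail" ""),
                   ("documentation", (PySem.Dict.mk x).getD "documentation" "")] from rfl] at hitems
            rw [hitems]
            simp [pvRepr, pvBuild]
          · rw [hadd]; simp [pvRepr]
        rw [hstep, ih (L ++ [(c, x)]), hpairs]
        have hcL : ((L.map Prod.fst).contains c) = false := by simpa using hmem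
        have hfilter :
            (pvPairs xs).filter (fun p => !((L ++ [(c, x)]).map Prod.fst).contains p.1)
              = ((pvPairs xs).filter (fun p => !(L.map Prod.fst).contains p.1)).filter
                  (fun q => !(q.1 == c)) := by
          rw [List.filter_filter]
          apply List.filter_congr
          intro p _
          simp only [List.map_append, List.contains_append]
          cases h1 : (L.map Prod.fst).contains p.1 <;> simp [List.contains_eq_mem] <;> tauto
        rw [show ((c, x) :: pvPairs xs).filter (fun p => !(L.map Prod.fst).contains p.1)
              = (c, x) :: (pvPairs xs).filter (fun p => !(L.map Prod.fst).contains p.1) by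
            simp only [List.filter_cons, hcL, Bool.not_false, reduceIte]]
        rw [pvFirstPerCode_cons, ← hfilter]
        simp only [List.append_assoc, List.singleton_append]
    · -- not disapproved: A skips and the pair is not extracted
      have hstep : pvStepA product_id title (pvRepr product_id title L) x
          = pvRepr product_id title L := by
        simp only [pvStepA, hs, reduceIte]
      have hpairs : pvPairs (x :: xs) = pvPairs xs := by simp [pvPairs, hs]
      rw [hstep, ih L, hpairs]

-- ===== VERDICT (by name: the statement is the Claim_ definition above) =====
theorem extract_product_issues_py_spec : Claim_equal_extract_product_issues_py := by
  intro product product_id title _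
  unfold Spec_extract_product_issues_py
  have h := pvFoldA product_id title ((PySem.Dict.mk product).getD "itemLevelIssues" []) []
  simp only [pvRepr, List.map_nil, List.nil_append, List.contains_nil, Bool.not_false,
    List.filter_true] at h
  simp only [extract_product_issues_py, extract_product_issues_py_alt]
  simp [h, List.map_map]
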